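-- pv_equiv track=rewrite | github.com/SvennyCookie/PRESENT_FWT | PRESENT128/getTableTk.py | key_down
-- ===== SOURCE A (Python) =====
-- def list_move_right(a,n):
--     length = len(a)
--     for i in range(n):
--         a.insert(0,a[length-1])
--         a.pop()
--     return(a)
--
-- def key_down(start,end):
--     a=[[0]]
--     for i in range(1,128):
--         a.append([i])
--     for count in range(start+1,end+1):
--         list_move_right(a,61)
--
--         x1 = a[123]
--         x2 = a[122]
--         x3 = a[121]
--         x4 = a[120]
--         a[123] = x1+x2+x3+x4
--         a[122] = x1+x2+x3+x4
--         a[121] = x1+x2+x3+x4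
--         a[120] = x1+x2+x3+x4
--
--         y1 = a[127]
--         y2 = a[126]
--         y3 = a[125]
--         y4 = a[124]
--         a[127] = y1+y2+y3+y4
--         a[126] = y1+y2+y3+y4
--         a[125] = y1+y2+y3+y4
--         a[124] = y1+y2+y3+y4
--
--         for i in range(len(a)):
--             a[i] = list(set(a[i]))
--             a[i].sort()
--     return a
-- ===== SOURCE B (Python) =====
-- def key_down(start, end):
--     # One round of A is a fixed linear map on the 128 dependency sets; B represents it
--     # as a 128x128 boolean matrix (one 128-bit integer per row) and raises it to the
--     # (end-start)-th power by repeated squaring instead of simulating round by round.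
--     base = [1 << ((i + 67) % 128) for i in range(128)]
--     for lo in (120, 124):
--         g = base[lo] | base[lo + 1] | base[lo + 2] | base[lo + 3]
--         base[lo:lo + 4] = [g, g, g, g]
--
--     def orrows(r, B):
--         acc = 0
--         for j in range(128):
--             if r >> j & 1:
--                 acc |= B[j]
--         return acc
--
--     def mul(A, B):
--         return [orrows(r, B) for r in A]
--
--     R = [1 << i for i in range(128)]          # identity matrix
--     P = base
--     m = end - start
--     if m < 0:
--         m = 0
--     while m:
--         if m & 1:
--             R = mul(R, P)
--         P = mul(P, P)
--         m >>= 1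
--     return [[j for j in range(128) if r >> j & 1] for r in R]
-- ===== Notes on version B (the rewrite author's own statement) =====
-- stated objective: alternative
-- what changed: B builds the fixed per-round dependency map once as a 128x128 boolean matrix (one 128-bit integer per row) and raises it to the (end-start)-th power by repeated squaring, instead of A's round-by-round simulation with insert/pop rotations and per-row set-union-and-sort; it trades per-round work for logarithmically many matrix products.
import Mathlib
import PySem

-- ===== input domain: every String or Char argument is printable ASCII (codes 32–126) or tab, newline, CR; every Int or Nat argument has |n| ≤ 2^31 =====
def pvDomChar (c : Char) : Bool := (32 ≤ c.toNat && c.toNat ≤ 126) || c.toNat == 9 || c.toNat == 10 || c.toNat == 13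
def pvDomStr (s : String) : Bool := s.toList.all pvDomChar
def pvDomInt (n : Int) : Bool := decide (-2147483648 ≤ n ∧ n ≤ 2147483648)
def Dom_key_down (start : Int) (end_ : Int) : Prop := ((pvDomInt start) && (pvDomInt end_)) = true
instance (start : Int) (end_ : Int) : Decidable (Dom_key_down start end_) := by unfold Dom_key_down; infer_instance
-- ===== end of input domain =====

-- B replaces A's round-by-round simulation (61 insert/pop rotation steps, set-union and re-sort of
-- every row every round) by building the fixed per-round dependency map once as a 128x128 boolean
-- matrix (one 128-bit integer per row) and raising it to the (end-start)-th power by repeated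
-- squaring (objective: alternative algorithm — logarithmically many matrix products instead of
-- one pass per round).

-- ===== PORT A =====
def moveStep (length : Int) (a : List (List Int)) : List (List Int) :=
  let x := PySem.List.pyGetD a (length - 1) []
  match PySem.List.pop? (PySem.List.insert a 0 x) (-1) with
  | some (_, rest) => rest
  | none => PySem.List.insert a 0 x

def list_move_right (a : List (List Int)) (n : Int) : List (List Int) :=
  let length := PySem.List.len a
  (PySem.List.pyRange 0 n 1).foldl (fun a _ => moveStep length a) a

def roundA (a : List (List Int)) : List (List Int) :=
  let a := list_move_right a 61
  let x1 := PySem.List.pyGetD a 123 []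
  let x2 := PySem.List.pyGetD a 122 []
  let x3 := PySem.List.pyGetD a 121 []
  let x4 := PySem.List.pyGetD a 120 []
  let a := PySem.List.pySetD a 123 (x1 ++ x2 ++ x3 ++ x4)
  let a := PySem.List.pySetD a 122 (x1 ++ x2 ++ x3 ++ x4)
  let a := PySem.List.pySetD a 121 (x1 ++ x2 ++ x3 ++ x4)
  let a := PySem.List.pySetD a 120 (x1 ++ x2 ++ x3 ++ x4)
  let y1 := PySem.List.pyGetD a 127 []
  let y2 := PySem.List.pyGetD a 126 []
  let y3 := PySem.List.pyGetD a 125 []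
  let y4 := PySem.List.pyGetD a 124 []
  let a := PySem.List.pySetD a 127 (y1 ++ y2 ++ y3 ++ y4)
  let a := PySem.List.pySetD a 126 (y1 ++ y2 ++ y3 ++ y4)
  let a := PySem.List.pySetD a 125 (y1 ++ y2 ++ y3 ++ y4)
  let a := PySem.List.pySetD a 124 (y1 ++ y2 ++ y3 ++ y4)
  (PySem.List.pyRange 0 (PySem.List.len a) 1).foldl
    (fun a i =>
      PySem.List.pySetD a i
        (PySem.List.sorted (PySem.Set.ofList (PySem.List.pyGetD a i [])) (fun x => x) false)) a

def key_down (start : Int) (end_ : Int) : List (List Int) :=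
  let a : List (List Int) := [[0]]
  let a := (PySem.List.pyRange 1 128 1).foldl (fun a i => a ++ [[i]]) a
  (PySem.List.pyRange (start+1) (end_+1) 1).foldl (fun a _ => roundA a) a

-- ===== PORT B =====
-- decode of one bitmask row: [j for j in range(128) if r >> j & 1]
def bitsOf (m : Int) : List Int :=
  (PySem.List.pyRange 0 128 1).filter (fun j => decide (PySem.Int.band (m >>> j.toNat) 1 ≠ 0))

-- orrows(r, B): acc = 0; for j in range(128): if r >> j & 1: acc |= B[j]
def orRows (r : Int) (B : List Int) : Int :=
  (PySem.List.pyRange 0 128 1).foldl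
    (fun acc j =>
      if PySem.Int.band (r >>> j.toNat) 1 ≠ 0 then PySem.Int.bor acc (PySem.List.pyGetD B j 0)
      else acc) 0

-- mul(A, B) = [orrows(r, B) for r in A]
def matMul (X : List Int) (Y : List Int) : List Int := X.map (fun r => orRows r Y)

-- the per-round dependency matrix `base` (helper hoisted to a definition; same construction)
def Tmat : List Int :=
  let base := (PySem.List.pyRange 0 128 1).map
    (fun i => (1:Int) <<< (PySem.Int.mod (i + 67) 128).toNat)
  [(120:Int), 124].foldl
    (fun b lo =>
      let g := PySem.Int.bor (PySem.Int.bor (PySem.Int.bor (PySem.List.pyGetD b lo 0)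
        (PySem.List.pyGetD b (lo+1) 0)) (PySem.List.pyGetD b (lo+2) 0)) (PySem.List.pyGetD b (lo+3) 0)
      -- slice assignment b[lo:lo+4] = [g,g,g,g]  (exact here: 0 ≤ lo and lo+4 ≤ len b)
      PySem.List.slice b none (some lo) ++ [g, g, g, g] ++ PySem.List.slice b (some (lo+4)) none)
    base

-- the identity matrix R = [1 << i for i in range(128)]
def Imat : List Int := (PySem.List.pyRange 0 128 1).map (fun i => (1:Int) <<< i.toNat)

-- while m: if m & 1: R = mul(R, P); P = mul(P, P); m >>= 1   (m ≥ 0, as a Nat)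
def binexp (R : List Int) (P : List Int) (m : Nat) : List Int :=
  if m = 0 then R
  else binexp (if m % 2 = 1 then matMul R P else R) (matMul P P) (m / 2)
  termination_by m
  decreasing_by omega

def key_down_alt (start : Int) (end_ : Int) : List (List Int) :=
  let m := end_ - start
  let m := if m < 0 then 0 else m
  (binexp Imat Tmat m.toNat).map bitsOf

-- ===== PRECONDITION & SPEC =====
def Spec_key_down (start : Int) (end_ : Int) (out : List (List Int)) : Prop := out = key_down_alt start end_
instance (start : Int) (end_ : Int) (out : List (List Int)) : Decidable (Spec_key_down start end_ out) := by unfold Spec_key_down; infer_instance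

-- ===== CLAIM =====
def Claim_equal_key_down : Prop := ∀ (start : Int) (end_ : Int), Dom_key_down start end_ → Spec_key_down start end_ (key_down start end_)

-- ===== LEMMAS AND PROOFS =====

-- proof-side: one-round simulation on bitmask rows (links A's round to a product with Tmat)
def simStep (masks : List Int) : List Int :=
  let masks := PySem.List.slice masks (some 67) none ++ PySem.List.slice masks none (some 67)
  let g1 := PySem.Int.bor (PySem.Int.bor (PySem.Int.bor (PySem.List.pyGetD masks 120 0) (PySem.List.pyGetD masks 121 0)) (PySem.List.pyGetD masks 122 0)) (PySem.List.pyGetD masks 123 0)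
  let g2 := PySem.Int.bor (PySem.Int.bor (PySem.Int.bor (PySem.List.pyGetD masks 124 0) (PySem.List.pyGetD masks 125 0)) (PySem.List.pyGetD masks 126 0)) (PySem.List.pyGetD masks 127 0)
  PySem.List.slice masks none (some 120) ++ [g1, g1, g1, g1, g2, g2, g2, g2] ++ PySem.List.slice masks (some 128) none

-- the per-row normalisation A applies each round: sorted(set(row))
def normRow (l : List Int) : List Int :=
  PySem.List.sorted (PySem.Set.ofList l) (fun x => x) false

-- --- bit-level facts ---
theorem band1_testBit (m : Int) (hm : 0 ≤ m) (j : Nat) :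
    (PySem.Int.band (m >>> j) 1 ≠ 0) ↔ m.toNat.testBit j := by
  obtain ⟨a, rfl⟩ := Int.eq_ofNat_of_zero_le hm
  rw [← Int.natCast_shiftRight]
  rw [show ((1:Int)) = ((1:Nat):Int) by rfl, PySem.Int.band_natCast]
  simp only [Int.toNat_natCast, ne_eq, Nat.cast_eq_zero]
  rw [Nat.and_one_is_mod]
  simp [Nat.testBit]

theorem bor_nonneg' (m n : Int) (hm : 0 ≤ m) (hn : 0 ≤ n) : 0 ≤ PySem.Int.bor m n := by
  rw [PySem.Int.bor_of_nonneg hm hn]; positivity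

theorem testBit_bor (m n : Int) (hm : 0 ≤ m) (hn : 0 ≤ n) (j : Nat) :
    (PySem.Int.bor m n).toNat.testBit j = (m.toNat.testBit j || n.toNat.testBit j) := by
  rw [PySem.Int.bor_of_nonneg hm hn]
  simp [Nat.testBit_or]

-- --- bitsOf facts ---
theorem bitsOf_pairwise (m : Int) : (bitsOf m).Pairwise (· < ·) := by
  exact List.Pairwise.sublist (List.filter_sublist) (PySem.List.pairwise_lt_pyRange_one 0 128)

theorem bitsOf_nodup (m : Int) : (bitsOf m).Nodup := by
  exact (bitsOf_pairwise m).imp ne_of_lt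

theorem mem_bitsOf (m : Int) (hm : 0 ≤ m) (x : Int) :
    x ∈ bitsOf m ↔ 0 ≤ x ∧ x < 128 ∧ m.toNat.testBit x.toNat := by
  unfold bitsOf
  rw [List.mem_filter, PySem.List.mem_pyRange_one]
  constructor
  · rintro ⟨⟨h0, h1⟩, hb⟩
    exact ⟨h0, h1, (band1_testBit m hm x.toNat).mp (by simpa using hb)⟩
  · rintro ⟨h0, h1, hb⟩
    exact ⟨⟨h0, h1⟩, by simpa using (band1_testBit m hm x.toNat).mpr hb⟩

theorem norm_bitsOf (m : Int) : normRow (bitsOf m) = bitsOf m := by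
  unfold normRow
  rw [show PySem.Set.ofList (bitsOf m) = bitsOf m from PySem.Set.ofList_eq_self_of_nodup _ (bitsOf_nodup m)]
  exact PySem.List.sorted_eq_self_of_pairwise _ _ ((bitsOf_pairwise m).imp le_of_lt)

theorem norm_merge (l : List Int) (M : Int)
    (hmem : ∀ x, x ∈ l ↔ x ∈ bitsOf M) :
    normRow l = bitsOf M := by
  unfold normRow
  apply PySem.List.sorted_eq_of_perm_of_pairwise_lt
  · apply (List.perm_ext_iff_of_nodup (bitsOf_nodup M) (PySem.Set.nodup_ofList l)).mpr
    intro x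
    rw [PySem.Set.mem_ofList, hmem]
  · exact bitsOf_pairwise M

-- --- rotation facts ---
theorem moveStep_rot (a : List (List Int)) (n : Nat) (hn : 0 < n) (ha : a.length = n) :
    moveStep (n : Int) a = a.drop (n-1) ++ a.take (n-1) := by
  rcases List.eq_nil_or_concat a with rfl | ⟨ys, y, rfl⟩
  · simp at ha; omega
  simp only [List.concat_eq_append] at *
  have hlen : ys.length + 1 = n := by simpa using ha
  have hx : PySem.List.pyGetD (ys ++ [y]) ((n:Int) - 1) [] = y := by
    rw [show (n:Int) - 1 = ((ys.length : Nat) : Int) by omega, PySem.List.pyGetD_natCast]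
    simp
  have hins : PySem.List.insert (ys ++ [y]) 0 y = y :: (ys ++ [y]) := by
    simp [PySem.List.insert, PySem.List.sliceIndices]
    rw [min_eq_left (by positivity)]
    simp
  have hpop : PySem.List.pop? (y :: (ys ++ [y])) (-1) = some (y, y :: ys) := by
    rw [show y :: (ys ++ [y]) = (y :: ys) ++ [y] by simp, PySem.List.pop?_last]
  simp only [moveStep, hx, hins, hpop]
  rw [show n - 1 = ys.length by omega]
  rw [List.drop_left, List.take_left]
  simp

theorem moveStep_rotate (a : List (List Int)) (n : Nat) (hn : 0 < n) (ha : a.length = n) :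
    moveStep (n : Int) a = a.rotate (n-1) := by
  rw [moveStep_rot a n hn ha, List.rotate_eq_drop_append_take (by omega)]

theorem rot_iter (n : Nat) (hn : 0 < n) (k : Nat) (a : List (List Int))
    (ha : a.length = n) :
    (fun a => moveStep (n : Int) a)^[k] a = a.rotate (k*(n-1)) := by
  induction k with
  | zero => simp
  | succ k ih =>
      rw [Function.iterate_succ_apply', ih]
      have hlen : (a.rotate (k*(n-1))).length = n := by simp [ha]
      rw [moveStep_rotate _ n hn hlen, List.rotate_rotate]
      ring_nf

theorem move61 (a : List (List Int)) (ha : a.length = 128) :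
    list_move_right a 61 = a.rotate 67 := by
  unfold list_move_right
  rw [List.foldl_const, PySem.List.length_pyRange_one]
  rw [PySem.List.len_eq, ha]
  have h61 : ((61:Int) - 0).toNat = 61 := by rfl
  rw [h61, rot_iter 128 (by omega) 61 a ha]
  have h := List.rotate_mod a (61*(128-1))
  rw [ha] at h
  norm_num at h ⊢
  exact h.symm

-- --- normalisation fold ---
theorem norm_fold_aux (pre post : List (List Int)) :
    (List.range' pre.length post.length).foldl
      (fun a i => a.set i (normRow (a.getD i []))) (pre ++ post)
    = pre ++ post.map normRow := by
  induction post generalizing pre with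
  | nil => simp
  | cons x rest ih =>
      simp only [List.length_cons]
      rw [List.range'_succ, List.foldl_cons]
      have hget : (pre ++ x :: rest).getD pre.length [] = x := by
        rw [List.getD_eq_getElem _ _ (by simp)]
        simp
      have hset : (pre ++ x :: rest).set pre.length (normRow x) = (pre ++ [normRow x]) ++ rest := by
        rw [List.set_append_right _ _ (by omega)]
        simp
      rw [hget, hset]
      have := ih (pre ++ [normRow x])
      simp only [List.length_append, List.length_singleton] at this
      rw [show pre.length + 1 = pre.length + 1 by rfl] at this
      simpa [List.append_assoc] using this

theorem norm_fold (xs : List (List Int)) :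
    (PySem.List.pyRange 0 (PySem.List.len xs) 1).foldl
      (fun a i =>
        PySem.List.pySetD a i
          (PySem.List.sorted (PySem.Set.ofList (PySem.List.pyGetD a i [])) (fun x => x) false)) xs
    = xs.map normRow := by
  rw [PySem.List.len_eq, PySem.List.pyRange_one]
  norm_num
  rw [List.foldl_map]
  have hbody : ∀ (a : List (List Int)) (k : Nat), k ∈ List.range xs.length →
      PySem.List.pySetD a (k : Int)
        (PySem.List.sorted (PySem.Set.ofList (PySem.List.pyGetD a (k : Int) [])) (fun x => x) false)
      = a.set k (normRow (a.getD k [])) := by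
    intro a k _
    rw [PySem.List.pyGetD_natCast, PySem.List.pySetD_natCast]
    rfl
  rw [PySem.List.foldl_congr_mem _ _ (fun a k => a.set k (normRow (a.getD k []))) _ hbody]
  rw [List.range_eq_range']
  have h := norm_fold_aux [] xs
  simpa using h

-- --- per-round equivalence ---
theorem merge4 (m1 m2 m3 m4 : Int) (h1 : 0 ≤ m1) (h2 : 0 ≤ m2) (h3 : 0 ≤ m3) (h4 : 0 ≤ m4) :
    normRow (bitsOf m4 ++ bitsOf m3 ++ bitsOf m2 ++ bitsOf m1)
    = bitsOf (PySem.Int.bor (PySem.Int.bor (PySem.Int.bor m1 m2) m3) m4) := by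
  have h12 : 0 ≤ PySem.Int.bor m1 m2 := bor_nonneg' _ _ h1 h2
  have h123 : 0 ≤ PySem.Int.bor (PySem.Int.bor m1 m2) m3 := bor_nonneg' _ _ h12 h3
  have h1234 : 0 ≤ PySem.Int.bor (PySem.Int.bor (PySem.Int.bor m1 m2) m3) m4 := bor_nonneg' _ _ h123 h4
  apply norm_merge
  intro x
  rw [mem_bitsOf _ h1234 x, testBit_bor _ _ h123 h4, testBit_bor _ _ h12 h3,
      testBit_bor _ _ h1 h2]
  simp only [List.mem_append, mem_bitsOf _ h1 x, mem_bitsOf _ h2 x, mem_bitsOf _ h3 x,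
      mem_bitsOf _ h4 x, Bool.or_eq_true]
  tauto

set_option maxRecDepth 4096 in
theorem roundA_eq (b : List Int) (hb : b.length = 128) (hnn : ∀ m ∈ b, 0 ≤ m) :
    roundA (b.map bitsOf) = (simStep b).map bitsOf := by
  have hmb : (b.map bitsOf).length = 128 := by simp [hb]
  have hrotA : list_move_right (b.map bitsOf) 61 = (b.rotate 67).map bitsOf := by
    rw [move61 _ hmb, List.map_rotate]
  have hc : (b.rotate 67).length = 128 := by simp [hb]
  have hcn : ∀ m ∈ b.rotate 67, 0 ≤ m := fun m hm => hnn m (List.mem_rotate.mp hm)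
  have hBrot : PySem.List.slice b (some 67) none ++ PySem.List.slice b none (some 67)
      = b.rotate 67 := by
    rw [PySem.List.slice_from (xs := b) (a := 67) (by norm_num),
        PySem.List.slice_to (xs := b) (b := 67) (by norm_num),
        List.rotate_eq_drop_append_take (by omega)]
    rfl
  set c := b.rotate 67 with hcdef
  have hcg : ∀ k : Nat, 0 ≤ c.getD k 0 := by
    intro k
    rcases Nat.lt_or_ge k c.length with hk | hk
    · rw [List.getD_eq_getElem _ _ hk]
      exact hcn _ (List.getElem_mem hk)
    · rw [List.getD_eq_default _ _ hk]
  have hcget : ∀ k : Nat, k < 128 → getElem? c k = some (c.getD k 0) := by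
    intro k hk
    rw [List.getElem?_eq_getElem (by omega), List.getD_eq_getElem _ _ (by omega)]
  have hr : ∀ (k : Nat), k < 128 → (c.map bitsOf).getD k [] = bitsOf (c.getD k 0) := by
    intro k hk
    rw [List.getD_eq_getElem?_getD, List.getElem?_map, hcget k hk]
    rfl
  have hset : ∀ (k : Nat) (s : List (List Int)) (v : List Int),
      PySem.List.pySetD s (OfNat.ofNat k) v = s.set k v := by
    intro k s v
    rw [show (OfNat.ofNat k : Int) = ((k : Nat) : Int) from rfl, PySem.List.pySetD_natCast]
  simp only [roundA, hrotA]
  rw [PySem.List.pyGetD_ofNat' _ 123 _, PySem.List.pyGetD_ofNat' _ 122 _,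
      PySem.List.pyGetD_ofNat' _ 121 _, PySem.List.pyGetD_ofNat' _ 120 _,
      hr 123 (by omega), hr 122 (by omega), hr 121 (by omega), hr 120 (by omega),
      hset 123, hset 122, hset 121, hset 120]
  set X := bitsOf (c.getD 123 0) ++ bitsOf (c.getD 122 0) ++ bitsOf (c.getD 121 0)
      ++ bitsOf (c.getD 120 0) with hX
  set s4 := ((((c.map bitsOf).set 123 X).set 122 X).set 121 X).set 120 X with hs4
  have hr4 : ∀ (k : Nat), 124 ≤ k → k < 128 → s4.getD k [] = bitsOf (c.getD k 0) := by
    intro k h1 h2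
    simp only [hs4]
    rw [List.getD_eq_getElem?_getD]
    rw [List.getElem?_set_ne (by omega), List.getElem?_set_ne (by omega),
        List.getElem?_set_ne (by omega), List.getElem?_set_ne (by omega)]
    rw [List.getElem?_map, hcget k h2]
    rfl
  rw [PySem.List.pyGetD_ofNat' _ 127 _, PySem.List.pyGetD_ofNat' _ 126 _,
      PySem.List.pyGetD_ofNat' _ 125 _, PySem.List.pyGetD_ofNat' _ 124 _,
      hr4 127 (by omega) (by omega), hr4 126 (by omega) (by omega),
      hr4 125 (by omega) (by omega), hr4 124 (by omega) (by omega),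
      hset 127, hset 126, hset 125, hset 124]
  set Y := bitsOf (c.getD 127 0) ++ bitsOf (c.getD 126 0) ++ bitsOf (c.getD 125 0)
      ++ bitsOf (c.getD 124 0) with hY
  set s8 := (((s4.set 127 Y).set 126 Y).set 125 Y).set 124 Y with hs8
  rw [norm_fold s8]
  -- simStep side
  simp only [simStep, hBrot]
  rw [PySem.List.pyGetD_ofNat' _ 120 _, PySem.List.pyGetD_ofNat' _ 121 _,
      PySem.List.pyGetD_ofNat' _ 122 _, PySem.List.pyGetD_ofNat' _ 123 _,
      PySem.List.pyGetD_ofNat' _ 124 _, PySem.List.pyGetD_ofNat' _ 125 _,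
      PySem.List.pyGetD_ofNat' _ 126 _, PySem.List.pyGetD_ofNat' _ 127 _]
  rw [PySem.List.slice_to (xs := c) (b := 120) (by norm_num),
      PySem.List.slice_from (xs := c) (a := 128) (by norm_num)]
  rw [show ((120:Int)).toNat = 120 from rfl, show ((128:Int)).toNat = 128 from rfl]
  rw [List.drop_of_length_le (by omega), List.append_nil]
  set g1 := PySem.Int.bor (PySem.Int.bor (PySem.Int.bor (c.getD 120 0) (c.getD 121 0)) (c.getD 122 0)) (c.getD 123 0) with hg1
  set g2 := PySem.Int.bor (PySem.Int.bor (PySem.Int.bor (c.getD 124 0) (c.getD 125 0)) (c.getD 126 0)) (c.getD 127 0) with hg2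
  have hs8len : s8.length = 128 := by simp [hs8, hs4, hc]
  apply List.ext_getElem?
  intro i
  rcases Nat.lt_or_ge i 128 with hi | hi
  · rw [List.getElem?_map, List.getElem?_map]
    have hrhs : getElem? (List.take 120 c ++ [g1, g1, g1, g1, g2, g2, g2, g2]) i
        = some (if i < 120 then c.getD i 0 else if i < 124 then g1 else g2) := by
      by_cases hlow : i < 120
      · rw [List.getElem?_append_left (by simp [hc]; omega), List.getElem?_take,
            if_pos hlow, hcget i hi, if_pos hlow]
      · rw [List.getElem?_append_right (by simp [hc]; omega)]
        simp only [List.length_take, hc]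
        have h120 : 120 ≤ i := by omega
        interval_cases i <;> simp
    have hlhs : getElem? s8 i = some (if i < 120 then bitsOf (c.getD i 0) else if i < 124 then X else Y) := by
      simp only [hs8, hs4]
      by_cases hlow : i < 120
      · rw [List.getElem?_set_ne (by omega), List.getElem?_set_ne (by omega),
            List.getElem?_set_ne (by omega), List.getElem?_set_ne (by omega),
            List.getElem?_set_ne (by omega), List.getElem?_set_ne (by omega),
            List.getElem?_set_ne (by omega), List.getElem?_set_ne (by omega)]
        rw [List.getElem?_map, hcget i hi, if_pos hlow]
        rfl
      · simp only [List.getElem?_set, List.length_set, List.length_map, hc]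
        have h120 : 120 ≤ i := by omega
        interval_cases i <;> simp
    rw [hlhs, hrhs]
    simp only [Option.map_some]
    refine congrArg some ?_
    by_cases hlow : i < 120
    · rw [if_pos hlow, if_pos hlow, norm_bitsOf]
    · by_cases h4 : i < 124
      · rw [if_neg hlow, if_neg hlow, if_pos h4, if_pos h4, hX, hg1]
        exact merge4 _ _ _ _ (hcg 120) (hcg 121) (hcg 122) (hcg 123)
      · rw [if_neg hlow, if_neg hlow, if_neg h4, if_neg h4, hY, hg2]
        exact merge4 _ _ _ _ (hcg 124) (hcg 125) (hcg 126) (hcg 127)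
  · rw [List.getElem?_eq_none (by simp [hs8len]; omega),
        List.getElem?_eq_none (by simp [hc]; omega)]

def A0 : List (List Int) := (PySem.List.pyRange 1 128 1).foldl (fun a i => a ++ [[i]]) [[0]]

theorem simStep_length (b : List Int) (hb : b.length = 128) : (simStep b).length = 128 := by
  simp only [simStep]
  rw [PySem.List.slice_from (xs := b) (a := 67) (by norm_num),
      PySem.List.slice_to (xs := b) (b := 67) (by norm_num)]
  rw [show ((67:Int)).toNat = 67 from rfl]
  set r := List.drop 67 b ++ List.take 67 b with hr
  have hrlen : r.length = 128 := by rw [hr]; simp [hb]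
  rw [PySem.List.slice_to (xs := r) (b := 120) (by norm_num),
      PySem.List.slice_from (xs := r) (a := 128) (by norm_num)]
  rw [show ((120:Int)).toNat = 120 from rfl, show ((128:Int)).toNat = 128 from rfl]
  simp [hrlen]

theorem simStep_nonneg (b : List Int) (hnn : ∀ m ∈ b, 0 ≤ m) :
    ∀ m ∈ simStep b, 0 ≤ m := by
  intro m hm
  simp only [simStep] at hm
  set r := PySem.List.slice b (some 67) none ++ PySem.List.slice b none (some 67) with hr
  have hrn : ∀ x ∈ r, 0 ≤ x := by
    intro x hx
    rcases List.mem_append.mp hx with h | h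
    · exact hnn x (PySem.List.mem_of_mem_slice _ _ _ h)
    · exact hnn x (PySem.List.mem_of_mem_slice _ _ _ h)
  have hgd : ∀ k : Nat, 0 ≤ r.getD k 0 := by
    intro k
    rcases Nat.lt_or_ge k r.length with hk | hk
    · rw [List.getD_eq_getElem _ _ hk]; exact hrn _ (List.getElem_mem hk)
    · rw [List.getD_eq_default _ _ hk]
  have hgd' : ∀ k : Nat, 0 ≤ PySem.List.pyGetD r (OfNat.ofNat k) 0 := by
    intro k; rw [PySem.List.pyGetD_ofNat']; exact hgd k
  have hg1 : 0 ≤ PySem.Int.bor (PySem.Int.bor (PySem.Int.bor (PySem.List.pyGetD r 120 0) (PySem.List.pyGetD r 121 0)) (PySem.List.pyGetD r 122 0)) (PySem.List.pyGetD r 123 0) :=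
    bor_nonneg' _ _ (bor_nonneg' _ _ (bor_nonneg' _ _ (hgd' 120) (hgd' 121)) (hgd' 122)) (hgd' 123)
  have hg2 : 0 ≤ PySem.Int.bor (PySem.Int.bor (PySem.Int.bor (PySem.List.pyGetD r 124 0) (PySem.List.pyGetD r 125 0)) (PySem.List.pyGetD r 126 0)) (PySem.List.pyGetD r 127 0) :=
    bor_nonneg' _ _ (bor_nonneg' _ _ (bor_nonneg' _ _ (hgd' 124) (hgd' 125)) (hgd' 126)) (hgd' 127)
  rcases List.mem_append.mp hm with h | h
  · rcases List.mem_append.mp h with h' | h'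
    · exact hrn m (PySem.List.mem_of_mem_slice _ _ _ h')
    · simp only [List.mem_cons, List.not_mem_nil, or_false] at h'
      rcases h' with rfl | rfl | rfl | rfl | rfl | rfl | rfl | rfl
      · exact hg1
      · exact hg1
      · exact hg1
      · exact hg1
      · exact hg2
      · exact hg2
      · exact hg2
      · exact hg2
  · exact hrn m (PySem.List.mem_of_mem_slice _ _ _ h)

set_option maxRecDepth 100000 in
theorem iter_inv (n : Nat) :
    (simStep^[n] Imat).length = 128 ∧ (∀ m ∈ simStep^[n] Imat, 0 ≤ m) ∧
      roundA^[n] A0 = (simStep^[n] Imat).map bitsOf := by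
  induction n with
  | zero =>
      refine ⟨by decide, by decide, by decide⟩
  | succ n ih =>
      obtain ⟨hl, hn, he⟩ := ih
      refine ⟨?_, ?_, ?_⟩
      · rw [Function.iterate_succ_apply']
        exact simStep_length _ hl
      · rw [Function.iterate_succ_apply']
        exact simStep_nonneg _ hn
      · rw [Function.iterate_succ_apply', Function.iterate_succ_apply', he]
        exact roundA_eq _ hl hn


-- --- boolean-matrix layer ---
def orUpTo (r : Int) (B : List Int) : Nat → Int
  | 0 => 0
  | n+1 => if PySem.Int.band (r >>> n) 1 ≠ 0 then PySem.Int.bor (orUpTo r B n) (B.getD n 0) else orUpTo r B n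

def MWF (M : List Int) : Prop :=
  M.length = 128 ∧ (∀ r ∈ M, 0 ≤ r) ∧ (∀ r ∈ M, r < 2^128)

def matPow (P : List Int) : Nat → List Int
  | 0 => Imat
  | n+1 => matMul P (matPow P n)

theorem getD_nonneg (B : List Int) (hB : ∀ b ∈ B, 0 ≤ b) (k : Nat) : 0 ≤ B.getD k 0 := by
  rcases Nat.lt_or_ge k B.length with hk | hk
  · rw [List.getD_eq_getElem _ _ hk]; exact hB _ (List.getElem_mem hk)
  · rw [List.getD_eq_default _ _ hk]

theorem getD_lt (B : List Int) (hB : ∀ b ∈ B, b < 2^128) (k : Nat) : B.getD k 0 < 2^128 := by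
  rcases Nat.lt_or_ge k B.length with hk | hk
  · rw [List.getD_eq_getElem _ _ hk]; exact hB _ (List.getElem_mem hk)
  · rw [List.getD_eq_default _ _ hk]; positivity

theorem orUpTo_nonneg (r : Int) (B : List Int) (hB : ∀ b ∈ B, 0 ≤ b) (n : Nat) :
    0 ≤ orUpTo r B n := by
  induction n with
  | zero => simp [orUpTo]
  | succ n ih =>
      unfold orUpTo; split
      · exact bor_nonneg' _ _ ih (getD_nonneg B hB n)
      · exact ih

theorem orUpTo_lt (r : Int) (B : List Int) (hB : ∀ b ∈ B, 0 ≤ b) (hB' : ∀ b ∈ B, b < 2^128)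
    (n : Nat) : orUpTo r B n < 2^128 := by
  have hpow : ((2:Int)^128) = ((2^128 : Nat) : Int) := by norm_num
  induction n with
  | zero => norm_num [orUpTo]
  | succ n ih =>
      unfold orUpTo; split
      · rw [PySem.Int.bor_of_nonneg (orUpTo_nonneg r B hB n) (getD_nonneg B hB n)]
        have h1 : (orUpTo r B n).toNat < 2^128 := by
          have ha := ih; rw [hpow] at ha
          exact_mod_cast (Int.toNat_lt_toNat (by positivity)).mpr ha
        have h2 : (B.getD n 0).toNat < 2^128 := by
          have ha := getD_lt B hB' n; rw [hpow] at ha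
          exact_mod_cast (Int.toNat_lt_toNat (by positivity)).mpr ha
        have := Nat.or_lt_two_pow h1 h2
        rw [hpow]; exact_mod_cast this
      · exact ih

theorem orUpTo_testBit (r : Int) (hr : 0 ≤ r) (B : List Int) (hB : ∀ b ∈ B, 0 ≤ b)
    (n : Nat) (t : Nat) :
    ((orUpTo r B n).toNat.testBit t = true) ↔
      ∃ k, k < n ∧ r.toNat.testBit k = true ∧ (B.getD k 0).toNat.testBit t = true := by
  induction n with
  | zero => simp [orUpTo]
  | succ n ih =>
      unfold orUpTo
      by_cases h : PySem.Int.band (r >>> n) 1 ≠ 0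
      · rw [if_pos h]
        have hbit : r.toNat.testBit n := (band1_testBit r hr n).mp h
        rw [testBit_bor _ _ (orUpTo_nonneg r B hB n) (getD_nonneg B hB n)]
        simp only [Bool.or_eq_true]
        constructor
        · rintro (hl | hr2)
          · obtain ⟨k, hk, h1, h2⟩ := ih.mp hl
            exact ⟨k, by omega, h1, h2⟩
          · exact ⟨n, by omega, hbit, hr2⟩
        · rintro ⟨k, hk, h1, h2⟩
          rcases Nat.lt_or_ge k n with hkn | hkn
          · exact Or.inl (ih.mpr ⟨k, hkn, h1, h2⟩)
          · have : k = n := by omega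
            subst this; exact Or.inr h2
      · rw [if_neg h]
        have hbit : r.toNat.testBit n = false := by
          by_contra hc
          exact h ((band1_testBit r hr n).mpr (by simpa using hc))
        rw [ih]
        constructor
        · rintro ⟨k, hk, h1, h2⟩; exact ⟨k, by omega, h1, h2⟩
        · rintro ⟨k, hk, h1, h2⟩
          rcases Nat.lt_or_ge k n with hkn | hkn
          · exact ⟨k, hkn, h1, h2⟩
          · have : k = n := by omega
            subst this; rw [hbit] at h1; exact absurd h1 (by simp)

theorem foldl_orUpTo (r : Int) (B : List Int) (n : Nat) :
    (List.range n).foldl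
      (fun acc (k : Nat) =>
        if PySem.Int.band (r >>> k) 1 ≠ 0 then PySem.Int.bor acc (B.getD k 0) else acc) 0
    = orUpTo r B n := by
  induction n with
  | zero => simp [orUpTo]
  | succ n ih => rw [List.range_succ, List.foldl_append, ih]; rfl

theorem orRows_eq (r : Int) (B : List Int) : orRows r B = orUpTo r B 128 := by
  unfold orRows
  rw [PySem.List.pyRange_one]
  rw [show ((128:Int) - 0).toNat = 128 from rfl]
  rw [List.foldl_map]
  have hbody : ∀ (acc : Int) (k : Nat), k ∈ List.range 128 →
      (if PySem.Int.band (r >>> ((((0 + (k:Int)).toNat : Nat)) : Int)) 1 ≠ 0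
       then PySem.Int.bor acc (PySem.List.pyGetD B (0 + (k:Int)) 0) else acc)
      = (if PySem.Int.band (r >>> k) 1 ≠ 0 then PySem.Int.bor acc (B.getD k 0) else acc) := by
    intro acc k _
    rw [zero_add, Int.toNat_natCast, PySem.List.pyGetD_natCast, Int.shiftRight_natCast_right]
  rw [PySem.List.foldl_congr_mem _ _
    (fun acc (k : Nat) => if PySem.Int.band (r >>> k) 1 ≠ 0 then PySem.Int.bor acc (B.getD k 0) else acc)
    _ hbody]
  exact foldl_orUpTo r B 128

theorem int_ext (a b : Int) (ha : 0 ≤ a) (hb : 0 ≤ b)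
    (h : ∀ t, a.toNat.testBit t = b.toNat.testBit t) : a = b := by
  have := Nat.eq_of_testBit_eq h; omega

theorem matMul_getElem? (X Y : List Int) (i : Nat) (hi : i < X.length) :
    (matMul X Y)[i]? = some (orRows (X.getD i 0) Y) := by
  unfold matMul
  rw [List.getElem?_map, List.getElem?_eq_getElem hi, List.getD_eq_getElem _ _ hi]
  rfl

theorem matMul_getD (X Y : List Int) (i : Nat) (hi : i < X.length) :
    (matMul X Y).getD i 0 = orRows (X.getD i 0) Y := by
  rw [List.getD_eq_getElem?_getD, matMul_getElem? X Y i hi]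
  rfl

theorem matMul_bit (X Y : List Int) (hXn : ∀ r ∈ X, 0 ≤ r) (hYn : ∀ b ∈ Y, 0 ≤ b)
    (i : Nat) (hi : i < X.length) (t : Nat) :
    (((matMul X Y).getD i 0).toNat.testBit t = true) ↔
      ∃ k, k < 128 ∧ (X.getD i 0).toNat.testBit k = true ∧
        ((Y.getD k 0)).toNat.testBit t = true := by
  rw [matMul_getD X Y i hi, orRows_eq,
      orUpTo_testBit _ (getD_nonneg X hXn i) _ hYn]

theorem matMul_MWF (X Y : List Int) (hX : MWF X) (hY : MWF Y) : MWF (matMul X Y) := by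
  obtain ⟨hXl, hXn, hXb⟩ := hX
  obtain ⟨hYl, hYn, hYb⟩ := hY
  refine ⟨by simp [matMul, hXl], ?_, ?_⟩
  · intro r hr
    obtain ⟨x, _, rfl⟩ := List.mem_map.mp hr
    rw [orRows_eq]; exact orUpTo_nonneg _ _ hYn _
  · intro r hr
    obtain ⟨x, _, rfl⟩ := List.mem_map.mp hr
    rw [orRows_eq]; exact orUpTo_lt _ _ hYn hYb _

theorem mat_ext (X Y : List Int) (hX : MWF X) (hY : MWF Y)
    (h : ∀ i, i < 128 → ∀ t, (X.getD i 0).toNat.testBit t = (Y.getD i 0).toNat.testBit t) :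
    X = Y := by
  obtain ⟨hXl, hXn, _⟩ := hX
  obtain ⟨hYl, hYn, _⟩ := hY
  apply List.ext_getElem (by omega)
  intro i h1 h2
  have hi : i < 128 := by omega
  have e1 : X[i] = X.getD i 0 := (List.getD_eq_getElem _ _ h1).symm
  have e2 : Y[i] = Y.getD i 0 := (List.getD_eq_getElem _ _ h2).symm
  rw [e1, e2]
  exact int_ext _ _ (getD_nonneg X hXn i) (getD_nonneg Y hYn i) (h i hi)

theorem bit_lt (x : Int) (hx0 : 0 ≤ x) (hx : x < 2^128) (t : Nat)
    (h : x.toNat.testBit t = true) : t < 128 := by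
  by_contra h'
  push_neg at h'
  have hxn : x.toNat < 2^128 := by
    have hpow : ((2:Int)^128) = ((2^128 : Nat) : Int) := by norm_num
    rw [hpow] at hx; omega
  have : x.toNat < 2^t := lt_of_lt_of_le hxn (Nat.pow_le_pow_right (by norm_num) h')
  rw [Nat.testBit_eq_false_of_lt this] at h
  exact absurd h (by simp)

theorem pow_toNat (k : Nat) : ((2:Int)^k).toNat = 2^k := by
  have : ((2:Int)^k) = ((2^k : Nat) : Int) := by push_cast; ring
  rw [this, Int.toNat_natCast]

theorem mul_pow_toNat (k : Nat) : ((15:Int) * 2^k).toNat = 15 * 2^k := by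
  have : ((15:Int) * 2^k) = ((15 * 2^k : Nat) : Int) := by push_cast; ring
  rw [this, Int.toNat_natCast]

theorem Imat_getD (i : Nat) (hi : i < 128) : Imat.getD i 0 = (2:Int)^i := by
  unfold Imat
  have hlen : ((PySem.List.pyRange 0 128 1).map (fun i => (1:Int) <<< i.toNat)).length = 128 := by
    simp [PySem.List.length_pyRange_one]
  rw [List.getD_eq_getElem _ _ (by omega)]
  rw [List.getElem_map, PySem.List.getElem_pyRange_one]
  rw [zero_add, Int.toNat_natCast, Int.shiftLeft_eq_mul_pow]
  push_cast
  ring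

theorem Imat_bit (i : Nat) (hi : i < 128) (t : Nat) :
    (Imat.getD i 0).toNat.testBit t = decide (i = t) := by
  rw [Imat_getD i hi, pow_toNat, Nat.testBit_two_pow]

set_option maxRecDepth 100000 in
theorem MWF_Imat : MWF Imat := by
  unfold MWF Imat; refine ⟨by decide, by decide, by decide⟩

theorem matMul_id_left (M : List Int) (hM : MWF M) : matMul Imat M = M := by
  apply mat_ext _ _ (matMul_MWF _ _ MWF_Imat hM) hM
  intro i hi t
  rw [Bool.eq_iff_iff,
      matMul_bit Imat M MWF_Imat.2.1 hM.2.1 i (by rw [MWF_Imat.1]; omega)]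
  constructor
  · rintro ⟨k, hk, h1, h2⟩
    rw [Imat_bit i hi] at h1
    have : i = k := by simpa using h1
    subst this; exact h2
  · intro h
    exact ⟨i, hi, by rw [Imat_bit i hi]; simp, h⟩

theorem matMul_id_right (M : List Int) (hM : MWF M) : matMul M Imat = M := by
  apply mat_ext _ _ (matMul_MWF _ _ hM MWF_Imat) hM
  intro i hi t
  rw [Bool.eq_iff_iff,
      matMul_bit M Imat hM.2.1 MWF_Imat.2.1 i (by rw [hM.1]; omega)]
  constructor
  · rintro ⟨k, hk, h1, h2⟩
    rw [Imat_bit k hk] at h2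
    have : k = t := by simpa using h2
    subst this; exact h1
  · intro h
    have ht : t < 128 := bit_lt _ (getD_nonneg M hM.2.1 i) (getD_lt M hM.2.2 i) t h
    exact ⟨t, ht, h, by rw [Imat_bit t ht]; simp⟩

theorem matMul_assoc (X Y Z : List Int) (hX : MWF X) (hY : MWF Y) (hZ : MWF Z) :
    matMul (matMul X Y) Z = matMul X (matMul Y Z) := by
  apply mat_ext _ _ (matMul_MWF _ _ (matMul_MWF _ _ hX hY) hZ)
      (matMul_MWF _ _ hX (matMul_MWF _ _ hY hZ))
  intro i hi t
  rw [Bool.eq_iff_iff]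
  rw [matMul_bit _ Z (matMul_MWF _ _ hX hY).2.1 hZ.2.1 i (by rw [(matMul_MWF _ _ hX hY).1]; omega)]
  rw [matMul_bit X _ hX.2.1 (matMul_MWF _ _ hY hZ).2.1 i (by rw [hX.1]; omega)]
  constructor
  · rintro ⟨k, hk, h1, h2⟩
    rw [matMul_bit X Y hX.2.1 hY.2.1 i (by rw [hX.1]; omega)] at h1
    obtain ⟨l, hl, h3, h4⟩ := h1
    refine ⟨l, hl, h3, ?_⟩
    rw [matMul_bit Y Z hY.2.1 hZ.2.1 l (by rw [hY.1]; omega)]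
    exact ⟨k, hk, h4, h2⟩
  · rintro ⟨l, hl, h3, h1⟩
    rw [matMul_bit Y Z hY.2.1 hZ.2.1 l (by rw [hY.1]; omega)] at h1
    obtain ⟨k, hk, h4, h2⟩ := h1
    refine ⟨k, hk, ?_, h2⟩
    rw [matMul_bit X Y hX.2.1 hY.2.1 i (by rw [hX.1]; omega)]
    exact ⟨l, hl, h3, h4⟩

theorem matPow_MWF (P : List Int) (hP : MWF P) (n : Nat) : MWF (matPow P n) := by
  induction n with
  | zero => exact MWF_Imat
  | succ n ih => exact matMul_MWF _ _ hP ih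

theorem matPow_sq (P : List Int) (hP : MWF P) (k : Nat) :
    matPow (matMul P P) k = matPow P (2*k) := by
  induction k with
  | zero => rfl
  | succ k ih =>
      show matMul (matMul P P) (matPow (matMul P P) k) = matPow P (2*(k+1))
      rw [ih, matMul_assoc P P _ hP hP (matPow_MWF P hP (2*k))]
      rw [show 2*(k+1) = (2*k+1)+1 by omega]
      rfl

set_option maxRecDepth 10000 in
set_option maxHeartbeats 1000000 in
theorem binexp_eq (m : Nat) : ∀ R P : List Int, MWF R → MWF P →
    binexp R P m = matMul R (matPow P m) := by
  induction m using Nat.strong_induction_on with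
  | _ m ih =>
      intro R P hR hP
      by_cases hm : m = 0
      · subst hm
        rw [binexp]
        simp only [if_true, if_pos]
        exact (matMul_id_right R hR).symm

      · rw [binexp]
        rw [if_neg hm]
        have hstep := ih (m/2) (by omega) (if m % 2 = 1 then matMul R P else R) (matMul P P)
          (by split
              · exact matMul_MWF _ _ hR hP
              · exact hR)
          (matMul_MWF _ _ hP hP)
        rw [hstep, matPow_sq P hP (m/2)]
        by_cases hodd : m % 2 = 1
        · rw [if_pos hodd]
          rw [matMul_assoc R P _ hR hP (matPow_MWF P hP (2*(m/2)))]
          have hmm : matPow P m = matMul P (matPow P (2*(m/2))) := by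
            conv_lhs => rw [show m = (2*(m/2))+1 by omega]
            simp [matPow]
          rw [hmm]
        · rw [if_neg hodd]
          congr 2
          omega

-- --- the per-round matrix ---
def Tval (i : Nat) : Int :=
  if i < 120 then (2:Int)^((i+67)%128)
  else if i < 124 then (15:Int) * 2^59 else (15:Int) * 2^63

set_option maxRecDepth 10000 in
theorem Tmat_eq : Tmat = (List.range 128).map Tval := by
  decide

set_option maxRecDepth 10000 in
theorem MWF_Tmat : MWF Tmat := by
  unfold MWF; refine ⟨by decide, by decide, by decide⟩

theorem Tmat_getD (i : Nat) (hi : i < 128) : Tmat.getD i 0 = Tval i := by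
  rw [Tmat_eq]
  rw [List.getD_eq_getElem _ _ (by simpa using hi)]
  rw [List.getElem_map, List.getElem_range]

theorem four_ones_bit (n t : Nat) :
    ((15 : Nat) <<< n).testBit t = decide (n ≤ t ∧ t < n + 4) := by
  rw [Nat.testBit_shiftLeft]
  by_cases h : n ≤ t
  · simp only [h, decide_true, Bool.true_and]
    by_cases h2 : t < n + 4
    · have h5 : t - n = 0 ∨ t - n = 1 ∨ t - n = 2 ∨ t - n = 3 := by omega
      have h6 : (15:Nat).testBit (t-n) = true := by
        rcases h5 with h5 | h5 | h5 | h5 <;> rw [h5] <;> decide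
      rw [h6]
      simp [h, h2]
    · have h4 : (15:Nat) < 2^(t-n) := by
        calc (15:Nat) < 2^4 := by norm_num
        _ ≤ 2^(t-n) := Nat.pow_le_pow_right (by norm_num) (by omega)
      rw [Nat.testBit_eq_false_of_lt h4]
      simp [h2]
  · simp [h]

theorem orRows_pow (k : Nat) (hk : k < 128) (M : List Int) (hM : ∀ b ∈ M, 0 ≤ b) :
    orRows ((2:Int)^k) M = M.getD k 0 := by
  apply int_ext _ _ (by rw [orRows_eq]; exact orUpTo_nonneg _ _ hM _) (getD_nonneg M hM k)
  intro t
  rw [Bool.eq_iff_iff, orRows_eq, orUpTo_testBit _ (by positivity) _ hM]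
  constructor
  · rintro ⟨j, hj, h1, h2⟩
    rw [pow_toNat, Nat.testBit_two_pow] at h1
    have : k = j := by simpa using h1
    subst this; exact h2
  · intro h
    exact ⟨k, hk, by rw [pow_toNat, Nat.testBit_two_pow]; simp, h⟩

theorem orRows_quad (n : Nat) (hn : n + 4 ≤ 128) (M : List Int) (hM : ∀ b ∈ M, 0 ≤ b) :
    orRows ((15:Int) * 2^n) M =
      PySem.Int.bor (PySem.Int.bor (PySem.Int.bor (M.getD n 0) (M.getD (n+1) 0))
        (M.getD (n+2) 0)) (M.getD (n+3) 0) := by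
  have g0 := getD_nonneg M hM n
  have g1 := getD_nonneg M hM (n+1)
  have g2 := getD_nonneg M hM (n+2)
  have g3 := getD_nonneg M hM (n+3)
  have b01 := bor_nonneg' _ _ g0 g1
  have b012 := bor_nonneg' _ _ b01 g2
  have b0123 := bor_nonneg' _ _ b012 g3
  apply int_ext _ _ (by rw [orRows_eq]; exact orUpTo_nonneg _ _ hM _) b0123
  intro t
  rw [Bool.eq_iff_iff, orRows_eq, orUpTo_testBit _ (by positivity) _ hM,
      testBit_bor _ _ b012 g3, testBit_bor _ _ b01 g2, testBit_bor _ _ g0 g1]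
  simp only [Bool.or_eq_true]
  constructor
  · rintro ⟨k, hk, h1, h2⟩
    rw [mul_pow_toNat, ← Nat.shiftLeft_eq, four_ones_bit] at h1
    have hkr : n ≤ k ∧ k < n + 4 := by simpa using h1
    have : k = n ∨ k = n+1 ∨ k = n+2 ∨ k = n+3 := by omega
    rcases this with rfl | rfl | rfl | rfl <;> tauto
  · intro h
    have hb : ∀ j, j < 4 → ((M.getD (n+j) 0).toNat.testBit t = true) →
        ∃ k, k < 128 ∧ ((15:Int) * 2^n).toNat.testBit k = true ∧
          (M.getD k 0).toNat.testBit t = true := by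
      intro j hj hbit
      exact ⟨n+j, by omega, by rw [mul_pow_toNat, ← Nat.shiftLeft_eq, four_ones_bit]; simp; omega, hbit⟩
    rcases h with ((h | h) | h) | h
    · exact hb 0 (by omega) (by simpa using h)
    · exact hb 1 (by omega) h
    · exact hb 2 (by omega) h
    · exact hb 3 (by omega) h

-- --- simStep is multiplication by Tmat ---
theorem rotate_getD (M : List Int) (hM : M.length = 128) (k : Nat) (hk : k < 128) :
    (M.rotate 67).getD k 0 = M.getD ((k + 67) % 128) 0 := by
  have h1 : k < (M.rotate 67).length := by simp [hM]; omega
  rw [List.getD_eq_getElem _ _ h1, List.getElem_rotate,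
      List.getD_eq_getElem _ _ (by rw [hM]; exact Nat.mod_lt _ (by omega))]
  congr 1
  rw [hM]

theorem simStep_getElem? (M : List Int) (hM : M.length = 128) (i : Nat) (hi : i < 128) :
    (simStep M)[i]? = some (if i < 120 then M.getD ((i + 67) % 128) 0
      else if i < 124 then
        PySem.Int.bor (PySem.Int.bor (PySem.Int.bor (M.getD 59 0) (M.getD 60 0)) (M.getD 61 0)) (M.getD 62 0)
      else
        PySem.Int.bor (PySem.Int.bor (PySem.Int.bor (M.getD 63 0) (M.getD 64 0)) (M.getD 65 0)) (M.getD 66 0)) := by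
  have hrot : PySem.List.slice M (some 67) none ++ PySem.List.slice M none (some 67)
      = M.rotate 67 := by
    rw [PySem.List.slice_from (xs := M) (a := 67) (by norm_num),
        PySem.List.slice_to (xs := M) (b := 67) (by norm_num),
        List.rotate_eq_drop_append_take (by omega)]
    rfl
  simp only [simStep, hrot]
  set c := M.rotate 67 with hc
  have hcl : c.length = 128 := by simp [hc, hM]
  have hcell : ∀ k : Nat, k < 128 → getElem? c k = some (M.getD ((k+67)%128) 0) := by
    intro k hk
    have h1 : k < c.length := by omega
    rw [List.getElem?_eq_getElem h1, ← List.getD_eq_getElem c 0 h1, hc, rotate_getD M hM k hk]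
  have hgd : ∀ k : Nat, k < 128 → PySem.List.pyGetD c (OfNat.ofNat k) 0 = M.getD ((k + 67) % 128) 0 := by
    intro k hk
    rw [show (OfNat.ofNat k : Int) = ((k : Nat) : Int) from rfl, PySem.List.pyGetD_natCast]
    exact rotate_getD M hM k hk
  rw [hgd 120 (by omega), hgd 121 (by omega), hgd 122 (by omega), hgd 123 (by omega),
      hgd 124 (by omega), hgd 125 (by omega), hgd 126 (by omega), hgd 127 (by omega)]
  norm_num
  rw [PySem.List.slice_to (xs := c) (b := 120) (by norm_num),
      PySem.List.slice_from (xs := c) (a := 128) (by norm_num)]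
  rw [show ((120:Int)).toNat = 120 from rfl, show ((128:Int)).toNat = 128 from rfl]
  rw [List.drop_of_length_le (by omega)]
  by_cases hlow : i < 120
  · rw [List.getElem?_append_left (by simp [hcl]; omega), List.getElem?_take, if_pos hlow,
        hcell i hi, if_pos hlow]
    rw [List.getD_eq_getElem?_getD]
  · rw [List.getElem?_append_right (by simp [hcl]; omega)]
    simp only [List.length_take, hcl]
    rw [if_neg hlow]
    have h120 : 120 ≤ i := by omega
    by_cases h4 : i < 124
    · rw [if_pos h4]
      interval_cases i <;> simp
    · rw [if_neg h4]
      interval_cases i <;> simp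

theorem simStep_eq (M : List Int) (hlen : M.length = 128) (hnn : ∀ r ∈ M, 0 ≤ r) :
    simStep M = matMul Tmat M := by
  have hT : Tmat.length = 128 := MWF_Tmat.1
  apply List.ext_getElem?
  intro i
  rcases Nat.lt_or_ge i 128 with hi | hi
  · rw [simStep_getElem? M hlen i hi, matMul_getElem? Tmat M i (by omega),
        Tmat_getD i hi]
    unfold Tval
    refine congrArg some ?_
    by_cases hlow : i < 120
    · rw [if_pos hlow, if_pos hlow, orRows_pow _ (Nat.mod_lt _ (by omega)) M hnn]
    · by_cases h4 : i < 124
      · rw [if_neg hlow, if_neg hlow, if_pos h4, if_pos h4,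
            orRows_quad 59 (by omega) M hnn]
      · rw [if_neg hlow, if_neg hlow, if_neg h4, if_neg h4,
            orRows_quad 63 (by omega) M hnn]
  · rw [List.getElem?_eq_none (by rw [simStep_length M hlen]; omega),
        List.getElem?_eq_none (by simp [matMul, hT]; omega)]

theorem simStep_iter (n : Nat) : simStep^[n] Imat = matPow Tmat n := by
  induction n with
  | zero => rfl
  | succ n ih =>
      rw [Function.iterate_succ_apply', ih]
      have hwf := matPow_MWF Tmat MWF_Tmat n
      exact simStep_eq _ hwf.1 (fun r hr => (hwf.2.1 r hr))

-- ===== VERDICT =====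
theorem key_down_spec : Claim_equal_key_down := by
  unfold Claim_equal_key_down
  intro start end_ _
  unfold Spec_key_down
  show key_down start end_ = key_down_alt start end_
  have hA : key_down start end_ = roundA^[(end_ - start).toNat] A0 := by
    unfold key_down
    simp only [List.foldl_const, PySem.List.length_pyRange_one]
    rw [show (end_ + 1 - (start + 1)) = end_ - start by ring]
    rfl
  have hB : key_down_alt start end_ = (binexp Imat Tmat (end_ - start).toNat).map bitsOf := by
    unfold key_down_alt
    show (binexp Imat Tmat (if end_ - start < 0 then 0 else end_ - start).toNat).map bitsOf = _
    rw [show (if end_ - start < 0 then 0 else end_ - start).toNat = (end_ - start).toNat by split <;> omega]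
  rw [hA, hB, (iter_inv _).2.2, simStep_iter,
      binexp_eq _ Imat Tmat MWF_Imat MWF_Tmat,
      matMul_id_left _ (matPow_MWF Tmat MWF_Tmat _)]
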